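-- pv_equiv track=rewrite | github.com/setiseta/bunkerweb-helm | scripts/generate-docs.py | extract_comments_for_key
-- ===== SOURCE A (Python) =====
-- from typing import Dict, Any, List, Tuple
--
-- def extract_comments_for_key(lines: List[str], key_line: int) -> Tuple[str, List[str]]:
--     """Extract comments associated with a specific key."""
--     if key_line < 0:
--         return "", []
--
--     description_lines = []
--     examples = []
--
--     # Look backwards for comments
--     j = key_line - 1
--     while j >= 0:
--         line = lines[j].strip()
--         if line.startswith('#'):
--             comment_text = line[1:].strip()
--             # Skip separator lines
--             if '=======' in comment_text or '-----' in comment_text: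
--                 break
--             if comment_text.lower().startswith('example'):
--                 examples.insert(0, comment_text)
--             elif comment_text:  # Non-empty comment
--                 description_lines.insert(0, comment_text)
--         elif line == '':
--             # Empty line - continue looking
--             j -= 1
--             continue
--         else:
--             # Non-comment, non-empty line - stop looking
--             break
--         j -= 1
--
--     description = ' '.join(description_lines) if description_lines else ""
--     return description, examples
-- ===== SOURCE B (Python) =====
-- def extract_comments_for_key(lines, key_line):
--     """Extract comments associated with a specific key."""
--     if key_line < 0:
--         return "", []
--     # Pass 1: backward scan to find the start of the comment block.
--     start = 0
--     j = key_line - 1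
--     while j >= 0:
--         s = lines[j].strip()
--         if s.startswith('#'):
--             t = s[1:].strip()
--             if '=======' in t or '-----' in t:
--                 start = j + 1
--                 break
--         elif s != '':
--             start = j + 1
--             break
--         j -= 1
--     # Pass 2: forward classification over the block, appending in order.
--     description_lines = []
--     examples = []
--     for i in range(start, key_line):
--         s = lines[i].strip()
--         if s.startswith('#'):
--             t = s[1:].strip()
--             if t.lower().startswith('example'):
--                 examples.append(t)
--             elif t:
--                 description_lines.append(t)
--     return (' '.join(description_lines) if description_lines else "", examples)
-- ===== Notes on version B (the rewrite author's own statement) =====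
-- stated objective: alternative
-- what changed: Replaces A's single backward while-loop that classifies and insert(0)-prepends as it goes by two passes: a backward scan that only computes the start index of the comment block, then a forward loop over [start, key_line) that classifies and appends in natural order.
-- outside the precondition, e.g. on extract_comments_for_key(['x'], 3): A raises IndexError, B raises IndexError
import Mathlib
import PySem

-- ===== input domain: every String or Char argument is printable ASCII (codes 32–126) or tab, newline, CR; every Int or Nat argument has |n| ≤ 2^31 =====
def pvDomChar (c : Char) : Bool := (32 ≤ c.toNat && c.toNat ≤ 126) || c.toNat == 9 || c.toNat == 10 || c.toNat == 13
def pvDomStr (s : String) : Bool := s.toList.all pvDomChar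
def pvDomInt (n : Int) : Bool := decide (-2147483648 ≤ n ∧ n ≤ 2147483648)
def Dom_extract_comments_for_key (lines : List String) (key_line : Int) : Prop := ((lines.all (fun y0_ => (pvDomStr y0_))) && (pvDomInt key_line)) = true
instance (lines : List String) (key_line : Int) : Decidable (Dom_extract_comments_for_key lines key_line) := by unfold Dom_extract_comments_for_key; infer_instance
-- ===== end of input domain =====

-- B replaces A's single backward loop with prepends by a backward scan that only finds the
-- block start, followed by a forward classification pass that appends in natural order (objective: alternative decomposition).

-- ===== PORT A =====
-- A's backward while-loop; fuel n means the current index j is n-1 (n = 0 ↔ j < 0).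
def pvA_loop (lines : List String) : Nat → List String × List String → List String × List String
  | 0, st => st
  | n + 1, (desc, ex) =>
      let line := PySem.Str.strip (lines.getD n "")
      if PySem.Str.startswith line "#" then
        let t := PySem.Str.strip (PySem.Str.slice line (some 1) none)
        if PySem.Str.isIn "=======" t || PySem.Str.isIn "-----" t then (desc, ex)
        else if PySem.Str.startswith (PySem.Str.lower t) "example" then
          pvA_loop lines n (desc, t :: ex)
        else if t ≠ "" then pvA_loop lines n (t :: desc, ex)
        else pvA_loop lines n (desc, ex)
      else if line = "" then pvA_loop lines n (desc, ex)
      else (desc, ex)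

def extract_comments_for_key (lines : List String) (key_line : Int) : String × List String :=
  if key_line < 0 then ("", [])
  else
    let r := pvA_loop lines key_line.toNat ([], [])
    ((if r.1 ≠ [] then PySem.Str.join " " r.1 else ""), r.2)

-- ===== PORT B =====
-- B pass 1: backward scan computing only the start index of the comment block.
def pvB_start (lines : List String) : Nat → Nat
  | 0 => 0
  | n + 1 =>
      let s := PySem.Str.strip (lines.getD n "")
      if PySem.Str.startswith s "#" then
        let t := PySem.Str.strip (PySem.Str.slice s (some 1) none)
        if PySem.Str.isIn "=======" t || PySem.Str.isIn "-----" t then n + 1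
        else pvB_start lines n
      else if s = "" then pvB_start lines n
      else n + 1

-- B pass 2: one forward classification step (the body of Source B's for-loop).
def pvB_step (lines : List String) (acc : List String × List String) (i : Int) :
    List String × List String :=
  let s := PySem.Str.strip (PySem.List.pyGetD lines i "")
  if PySem.Str.startswith s "#" then
    let t := PySem.Str.strip (PySem.Str.slice s (some 1) none)
    if PySem.Str.startswith (PySem.Str.lower t) "example" then (acc.1, acc.2 ++ [t])
    else if t ≠ "" then (acc.1 ++ [t], acc.2)
    else acc
  else acc

def extract_comments_for_key_alt (lines : List String) (key_line : Int) : String × List String :=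
  if key_line < 0 then ("", [])
  else
    let start := pvB_start lines key_line.toNat
    let r := (PySem.List.pyRange (start : Int) key_line 1).foldl (pvB_step lines) ([], [])
    ((if r.1 ≠ [] then PySem.Str.join " " r.1 else ""), r.2)

-- ===== PRECONDITION & SPEC =====
-- Pre_ excludes exactly the inputs where the Python A raises IndexError: the first access
-- lines[key_line - 1] is out of range when key_line - 1 ≥ len(lines) (and key_line ≥ 1).
def Pre_extract_comments_for_key (lines : List String) (key_line : Int) : Prop :=
  key_line ≤ (lines.length : Int)
instance (lines : List String) (key_line : Int) : Decidable (Pre_extract_comments_for_key lines key_line) := by unfold Pre_extract_comments_for_key; infer_instance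

def pvWitness_extract_comments_for_key : List String × Int := (["# a note", "#Example: x"], 2)

def Spec_extract_comments_for_key (lines : List String) (key_line : Int) (out : String × List String) : Prop := out = extract_comments_for_key_alt lines key_line
instance (lines : List String) (key_line : Int) (out : String × List String) : Decidable (Spec_extract_comments_for_key lines key_line out) := by unfold Spec_extract_comments_for_key; infer_instance

-- ===== CLAIM (what is proved, stated in full; the proofs are below) =====
def Claim_equal_extract_comments_for_key : Prop := ∀ (lines : List String) (key_line : Int), Dom_extract_comments_for_key lines key_line → Pre_extract_comments_for_key lines key_line → Spec_extract_comments_for_key lines key_line (extract_comments_for_key lines key_line)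

-- ===== LEMMAS AND PROOFS =====

-- B's start index never exceeds the scan bound.
theorem pvB_start_le (lines : List String) : ∀ n : Nat, pvB_start lines n ≤ n := by
  intro n
  induction n with
  | zero => simp [pvB_start]
  | succ n ih =>
    unfold pvB_start
    dsimp only
    split_ifs <;> omega

-- Main invariant: A's backward prepending loop equals B's forward fold over [start, n),
-- with the accumulators appended behind.
theorem pvA_loop_eq (lines : List String) : ∀ (n : Nat) (d e : List String),
    pvA_loop lines n (d, e) =
      (((PySem.List.pyRange (pvB_start lines n : Int) (n : Int) 1).foldl (pvB_step lines) ([], [])).1 ++ d,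
       ((PySem.List.pyRange (pvB_start lines n : Int) (n : Int) 1).foldl (pvB_step lines) ([], [])).2 ++ e) := by
  intro n
  induction n with
  | zero =>
    intro d e
    simp [pvA_loop, pvB_start, PySem.List.pyRange_one_eq_nil (by omega : (0:Int) ≤ 0)]
  | succ n ih =>
    intro d e
    have hle : pvB_start lines n ≤ n := pvB_start_le lines n
    have hsplit : PySem.List.pyRange (pvB_start lines n : Int) ((n + 1 : Nat) : Int) 1 =
        PySem.List.pyRange (pvB_start lines n : Int) (n : Int) 1 ++ [(n : Int)] := by
      push_cast
      exact PySem.List.pyRange_one_succ_right (by exact_mod_cast hle)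
    unfold pvA_loop pvB_start
    dsimp only
    split_ifs with h1 h2 h3 h4 h5
    · -- separator comment: both regions empty
      simp
    · -- example comment
      rw [ih, hsplit, List.foldl_append]
      simp only [List.foldl_cons, List.foldl_nil]
      rw [pvB_step]
      simp only [PySem.List.pyGetD_natCast]
      rw [if_pos h1, if_pos h3]
      simp
    · -- description comment
      rw [ih, hsplit, List.foldl_append]
      simp only [List.foldl_cons, List.foldl_nil]
      rw [pvB_step]
      simp only [PySem.List.pyGetD_natCast]
      rw [if_pos h1, if_neg h3, if_pos h4]
      simp
    · -- empty comment text: contributes nothing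
      rw [ih, hsplit, List.foldl_append]
      simp only [List.foldl_cons, List.foldl_nil]
      rw [pvB_step]
      simp only [PySem.List.pyGetD_natCast]
      rw [if_pos h1, if_neg h3, if_neg h4]
    · -- blank line: contributes nothing
      rw [ih, hsplit, List.foldl_append]
      simp only [List.foldl_cons, List.foldl_nil]
      rw [pvB_step]
      simp only [PySem.List.pyGetD_natCast]
      rw [if_neg h1]
    · -- non-comment non-empty line: stop, both regions empty
      simp

-- ===== VERDICT (by name: the statement is the Claim_ definition above) =====
theorem extract_comments_for_key_spec : Claim_equal_extract_comments_for_key := by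
  intro lines key_line _ _
  unfold Spec_extract_comments_for_key extract_comments_for_key extract_comments_for_key_alt
  by_cases hneg : key_line < 0
  · simp [hneg]
  · simp only [if_neg hneg]
    have hkl : ((key_line.toNat : Nat) : Int) = key_line := Int.toNat_of_nonneg (by omega)
    rw [pvA_loop_eq lines key_line.toNat [] [], hkl]
    simp
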